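-- pv_equiv track=rewrite | github.com/trp-tech/promasch-data-extraction | api-extraction/indent/collector.py | encode_gwt_long
-- ===== SOURCE A (Python) =====
-- _GWT_B64 = "ABCDEFGHIJKLMNOPQRSTUVWXYZabcdefghijklmnopqrstuvwxyz0123456789$_"
--
-- def encode_gwt_long(value: int) -> str:
--     """Encode a non-negative Java long as GWT base-64 (used in request payloads).
--
--     Each character encodes 6 bits, big-endian (most significant first).
--     Verified: encode_gwt_long(6505) == 'Blp'.
--     """
--     if value == 0:
--         return "A"
--     chars: list[str] = []
--     v = value
--     while v > 0:
--         chars.append(_GWT_B64[v & 0x3F])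
--         v >>= 6
--     return "".join(reversed(chars))
-- ===== SOURCE B (Python) =====
-- _GWT_B64 = "ABCDEFGHIJKLMNOPQRSTUVWXYZabcdefghijklmnopqrstuvwxyz0123456789$_"
--
-- def encode_gwt_long(value: int) -> str:
--     """Encode a non-negative Java long as GWT base-64 (used in request payloads)."""
--     if value == 0:
--         return "A"
--     n = (value.bit_length() + 5) // 6
--     return "".join(_GWT_B64[(value >> (6 * i)) & 0x3F] for i in range(n - 1, -1, -1))
-- ===== Notes on version B (the rewrite author's own statement) =====
-- stated objective: alternative
-- what changed: B sizes the output up front with bit_length and emits the 6-bit digits most-significant-first by positional shifts, instead of A's accumulate-LSB-first-into-a-list-then-reverse loop.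
-- outside the precondition, e.g. on encode_gwt_long(-1): A returns '', B returns '_'
import Mathlib
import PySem

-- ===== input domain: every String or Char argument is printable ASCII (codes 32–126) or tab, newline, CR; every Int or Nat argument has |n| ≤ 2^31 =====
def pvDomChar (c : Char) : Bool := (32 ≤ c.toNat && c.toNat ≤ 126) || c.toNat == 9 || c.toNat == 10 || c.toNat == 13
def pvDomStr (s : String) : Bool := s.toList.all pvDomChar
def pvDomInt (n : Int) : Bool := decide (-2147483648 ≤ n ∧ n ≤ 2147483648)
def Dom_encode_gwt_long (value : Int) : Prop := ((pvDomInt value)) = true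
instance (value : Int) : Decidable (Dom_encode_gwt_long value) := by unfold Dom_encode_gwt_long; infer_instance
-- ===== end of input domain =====

-- B replaces A's append-LSB-then-reverse loop by an up-front bit_length sizing and a single
-- most-significant-first forward pass; same cost, no reversal ("alternative").

-- ===== PORT A =====
-- _GWT_B64 (module constant)
def gwtStr : List Char := "ABCDEFGHIJKLMNOPQRSTUVWXYZabcdefghijklmnopqrstuvwxyz0123456789$_".toList

-- the `while v > 0` loop of A; `v` is nonnegative throughout (v = value > 0 at entry), so a Nat
-- carries it faithfully: Python's `v & 0x3F` / `v >>= 6` are Nat `&&& 63` / `>>> 6` there.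
def gwtLoopA (v : Nat) (chars : List Char) : List Char :=
  if 0 < v then gwtLoopA (v >>> 6) (chars ++ [gwtStr.getD (v &&& 63) ' ']) else chars
  termination_by v
  decreasing_by
    rename_i h
    simp only [Nat.shiftRight_eq_div_pow]
    exact Nat.div_lt_self h (by norm_num)

def encode_gwt_long (value : Int) : String :=
  if value = 0 then "A"
  else String.mk ((gwtLoopA value.toNat []).reverse)   -- "".join(reversed(chars))

-- ===== PORT B =====
def encode_gwt_long_alt (value : Int) : String :=
  if value = 0 then "A"
  else
    -- n = (value.bit_length() + 5) // 6; digits emitted for i = n-1, …, 0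
    -- `value >> (6*i)` = value // 2**(6*i) (Python-exact, incl. negatives) ported as floordiv;
    -- `& 0x3F` ported as PySem.Int.band (Python-exact on negatives)
    let n := (PySem.Int.bitLength value + 5) / 6
    String.mk ((List.range n).reverse.map
      (fun i => gwtStr.getD (PySem.Int.band (PySem.Int.floordiv value ((2 : Int) ^ (6 * i))) 63).toNat ' '))

-- ===== PRECONDITION & SPEC =====
-- Pre_ excludes negative values, outside the function's documented non-negative domain, where
-- A's empty string (the loop never runs) and B's shift-based digits are both accidental.
def Pre_encode_gwt_long (value : Int) : Prop := 0 ≤ value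
instance (value : Int) : Decidable (Pre_encode_gwt_long value) := by
  unfold Pre_encode_gwt_long; infer_instance

def pvWitness_encode_gwt_long : Int := 6505

def Spec_encode_gwt_long (value : Int) (out : String) : Prop := out = encode_gwt_long_alt value
instance (value : Int) (out : String) : Decidable (Spec_encode_gwt_long value out) := by
  unfold Spec_encode_gwt_long; infer_instance

-- ===== CLAIM (what is proved, stated in full; the proofs are below) =====
def Claim_equal_encode_gwt_long : Prop := ∀ (value : Int), Dom_encode_gwt_long value → Pre_encode_gwt_long value → Spec_encode_gwt_long value (encode_gwt_long value)

-- ===== LEMMAS AND PROOFS =====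

-- bit_length drops by exactly 6 on one 64-division step
lemma bitLength_div64 (v : Nat) (h : 64 ≤ v) :
    PySem.Int.bitLength (v : Int) = PySem.Int.bitLength ((v / 64 : Nat) : Int) + 6 := by
  rw [PySem.Int.bitLength_natCast (by omega : 0 < v),
      PySem.Int.bitLength_natCast (by omega : 0 < v / 2),
      PySem.Int.bitLength_natCast (by omega : 0 < v / 2 / 2),
      PySem.Int.bitLength_natCast (by omega : 0 < v / 2 / 2 / 2),
      PySem.Int.bitLength_natCast (by omega : 0 < v / 2 / 2 / 2 / 2),
      PySem.Int.bitLength_natCast (by omega : 0 < v / 2 / 2 / 2 / 2 / 2)]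
  have : v / 2 / 2 / 2 / 2 / 2 / 2 = v / 64 := by omega
  rw [this]

lemma bitLength_pos (v : Nat) (h : 0 < v) : 0 < PySem.Int.bitLength (v : Int) := by
  by_contra hc
  have hc0 : PySem.Int.bitLength (v : Int) = 0 := by omega
  have hlt := PySem.Int.lt_two_pow_bitLength (v : Int)
  rw [hc0] at hlt
  simp only [Int.natAbs_natCast, pow_zero] at hlt
  omega

lemma bitLength_le_six (v : Nat) (h0 : 0 < v) (h : v < 64) :
    PySem.Int.bitLength (v : Int) ≤ 6 := by
  by_contra hc
  have hne : (v : Int) ≠ 0 := by exact_mod_cast h0.ne'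
  have hle := PySem.Int.two_pow_bitLength_le (v : Int) hne
  simp only [Int.natAbs_natCast] at hle
  have h2 : (64 : Nat) ≤ 2 ^ (PySem.Int.bitLength (v : Int) - 1) := by
    calc (64 : Nat) = 2 ^ 6 := by norm_num
      _ ≤ 2 ^ (PySem.Int.bitLength (v : Int) - 1) :=
          Nat.pow_le_pow_right (by norm_num) (by omega)
  omega

-- A's loop appends exactly the LSB-first list of the n = (bit_length+5)/6 six-bit digits
lemma gwtLoopA_eq : ∀ (v : Nat), 0 < v → ∀ chars : List Char,
    gwtLoopA v chars = chars ++
      (List.range ((PySem.Int.bitLength (v : Int) + 5) / 6)).map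
        (fun i => gwtStr.getD ((v >>> (6 * i)) &&& 63) ' ') := by
  intro v
  induction v using Nat.strong_induction_on with
  | _ v IH =>
    intro hv chars
    rw [gwtLoopA, if_pos hv]
    by_cases h64 : v < 64
    · have h0 : v >>> 6 = 0 := by simp only [Nat.shiftRight_eq_div_pow]; omega
      rw [h0, gwtLoopA, if_neg (by omega)]
      have hn : (PySem.Int.bitLength (v : Int) + 5) / 6 = 1 := by
        have := bitLength_pos v hv
        have := bitLength_le_six v hv h64
        omega
      rw [hn]
      simp [Nat.shiftRight_zero]
    · rw [not_lt] at h64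
      have hshift : v >>> 6 = v / 64 := by simp [Nat.shiftRight_eq_div_pow]
      have hlt : v >>> 6 < v := by rw [hshift]; exact Nat.div_lt_self hv (by norm_num)
      have hpos : 0 < v >>> 6 := by rw [hshift]; omega
      rw [IH (v >>> 6) hlt hpos]
      have hn : (PySem.Int.bitLength (v : Int) + 5) / 6
          = ((PySem.Int.bitLength ((v >>> 6 : Nat) : Int) + 5) / 6) + 1 := by
        rw [hshift, bitLength_div64 v h64]
        have := bitLength_pos (v / 64) (by omega)
        omega
      rw [hn, List.range_succ_eq_map]
      simp only [List.map_cons, List.map_map, Nat.mul_zero, Nat.shiftRight_zero,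
        List.append_assoc, List.singleton_append]
      congr 1
      congr 1
      apply List.map_congr_left
      intro i _
      simp only [Function.comp]
      congr 2
      rw [← Nat.shiftRight_add]
      congr 1
      omega

-- ===== VERDICT (by name: the statement is the Claim_ definition above) =====
theorem encode_gwt_long_spec : Claim_equal_encode_gwt_long := by
  intro value _ hpre
  unfold Spec_encode_gwt_long encode_gwt_long encode_gwt_long_alt
  by_cases hz : value = 0
  · simp [hz]
  · simp only [if_neg hz]
    have hv : 0 < value.toNat := by
      unfold Pre_encode_gwt_long at hpre; omega
    have hcast : ((value.toNat : Nat) : Int) = value := Int.toNat_of_nonneg hpre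
    rw [gwtLoopA_eq value.toNat hv [], List.nil_append, hcast, List.map_reverse]
    refine congrArg _ (congrArg _ (List.map_congr_left ?_))
    intro i _
    have h2 : ((2 : Int) ^ (6 * i)) = (((2 ^ (6 * i) : Nat)) : Int) := by push_cast; ring
    rw [← hcast, h2, PySem.Int.floordiv_natCast]
    have h63 : (63 : Int) = ((63 : Nat) : Int) := rfl
    rw [h63, PySem.Int.band_natCast]
    simp [Nat.shiftRight_eq_div_pow, Int.toNat_of_nonneg hpre]
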